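-- pv_equiv track=rewrite | github.com/KIMSEULBEEN/problem-solving | BOJ/15953.py | first_code
-- ===== SOURCE A (Python) =====
-- def first_code(num):
--     ds = 0
--     for n in range(1,8):
--         ds += n
--         if num == 0:
--             break
--         if num <= ds:
--             break
--     if num == 0:
--         return 0
--
--     if n == 1:
--         return 500
--     elif n == 2:
--         return 300
--     elif n == 3:
--         return 200
--     elif n == 4:
--         return 50
--     elif n == 5:
--         return 30
--     elif n == 6:
--         return 10
--     else:
--         return 0
-- ===== SOURCE B (Python) =====
-- def first_code(num):
--     if num == 0:
--         return 0
--     thresholds = [1, 3, 6, 10, 15, 21, 28]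
--     prizes = [500, 300, 200, 50, 30, 10, 0]
--     lo, hi = 0, 7
--     while lo < hi:
--         mid = (lo + hi) // 2
--         if thresholds[mid] < num:
--             lo = mid + 1
--         else:
--             hi = mid
--     return prizes[min(lo, 6)]
-- ===== Notes on version B (the rewrite author's own statement) =====
-- stated objective: alternative
-- what changed: Replaces A's sequential accumulate-triangular-numbers-until-exceeded loop and if/elif chain with a precomputed thresholds table queried by a hand-written binary search (bisect_left), clamped and indexed into a parallel prizes table.
import Mathlib
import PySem

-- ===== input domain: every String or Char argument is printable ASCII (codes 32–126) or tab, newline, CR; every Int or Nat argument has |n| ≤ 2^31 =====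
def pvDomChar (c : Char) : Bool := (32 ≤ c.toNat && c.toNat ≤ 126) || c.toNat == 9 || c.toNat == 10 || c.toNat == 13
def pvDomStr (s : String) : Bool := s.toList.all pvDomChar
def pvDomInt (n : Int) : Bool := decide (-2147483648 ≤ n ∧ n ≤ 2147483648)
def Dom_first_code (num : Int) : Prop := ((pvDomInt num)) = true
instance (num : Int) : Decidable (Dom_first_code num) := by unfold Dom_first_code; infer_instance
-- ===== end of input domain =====

set_option maxRecDepth 4000

-- B replaces A's accumulate-until-exceeded scan by a thresholds table + binary search; alternative, not faster.

-- ===== PORT A =====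
-- the for-loop of A: state (ds, last n); a break keeps the current n
def pvALoop (num : Int) : List Int → Int × Int → Int × Int
  | [], st => st
  | n :: rest, (ds, _) =>
      let ds' := ds + n
      if num = 0 then (ds', n)
      else if num ≤ ds' then (ds', n)
      else pvALoop num rest (ds', n)

def first_code (num : Int) : Int :=
  let st := pvALoop num (PySem.List.pyRange 1 8 1) (0, 0)
  let n := st.2
  if num = 0 then 0
  else if n = 1 then 500
  else if n = 2 then 300
  else if n = 3 then 200
  else if n = 4 then 50
  else if n = 5 then 30
  else if n = 6 then 10
  else 0

-- ===== PORT B =====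
-- the hand-written bisect_left while-loop of Source B, recursion on hi - lo
def pvBsearch (num : Int) (lo hi : Nat) : Nat :=
  if h : lo < hi then
    let mid := (lo + hi) / 2
    if PySem.List.pyGetD [(1:Int), 3, 6, 10, 15, 21, 28] (mid : Int) 0 < num then
      pvBsearch num (mid + 1) hi
    else
      pvBsearch num lo mid
  else lo
termination_by hi - lo
decreasing_by all_goals omega

def first_code_alt (num : Int) : Int :=
  if num = 0 then 0
  else
    let lo := pvBsearch num 0 7
    PySem.List.pyGetD [(500:Int), 300, 200, 50, 30, 10, 0] ((min lo 6 : Nat) : Int) 0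

-- ===== PRECONDITION & SPEC =====
def Spec_first_code (num : Int) (out : Int) : Prop := out = first_code_alt num
instance (num : Int) (out : Int) : Decidable (Spec_first_code num out) := by unfold Spec_first_code; infer_instance

-- ===== CLAIM (what is proved, stated in full; the proofs are below) =====
def Claim_equal_first_code : Prop := ∀ (num : Int), Dom_first_code num → Spec_first_code num (first_code num)

-- ===== LEMMAS AND PROOFS =====

theorem pvBsearch_eval (num : Int) :
    pvBsearch num 0 7 =
      if num ≤ 1 then 0 else if num ≤ 3 then 1 else if num ≤ 6 then 2
      else if num ≤ 10 then 3 else if num ≤ 15 then 4 else if num ≤ 21 then 5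
      else if num ≤ 28 then 6 else 7 := by
  by_cases h1 : num ≤ 1
  · rw [pvBsearch]; norm_num [PySem.List.pyGetD, PySem.List.pyIdx?]
    rw [if_neg (by first | omega | (simp; omega)), pvBsearch]
    norm_num [PySem.List.pyGetD, PySem.List.pyIdx?]
    rw [if_neg (by first | omega | (simp; omega)), pvBsearch]
    norm_num [PySem.List.pyGetD, PySem.List.pyIdx?]
    rw [if_neg (by first | omega | (simp; omega)), pvBsearch]
    simp [h1]
  by_cases h2 : num ≤ 3
  · rw [pvBsearch]; norm_num [PySem.List.pyGetD, PySem.List.pyIdx?]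
    rw [if_neg (by first | omega | (simp; omega)), pvBsearch]
    norm_num [PySem.List.pyGetD, PySem.List.pyIdx?]
    rw [if_neg (by first | omega | (simp; omega)), pvBsearch]
    norm_num [PySem.List.pyGetD, PySem.List.pyIdx?]
    rw [if_pos (by first | omega | (simp; omega)), pvBsearch]
    simp [h1, h2]
  by_cases h3 : num ≤ 6
  · rw [pvBsearch]; norm_num [PySem.List.pyGetD, PySem.List.pyIdx?]
    rw [if_neg (by first | omega | (simp; omega)), pvBsearch]
    norm_num [PySem.List.pyGetD, PySem.List.pyIdx?]
    rw [if_pos (by first | omega | (simp; omega)), pvBsearch]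
    norm_num [PySem.List.pyGetD, PySem.List.pyIdx?]
    rw [if_neg (by first | omega | (simp; omega)), pvBsearch]
    simp [h1, h2, h3]
  by_cases h4 : num ≤ 10
  · rw [pvBsearch]; norm_num [PySem.List.pyGetD, PySem.List.pyIdx?]
    rw [if_neg (by first | omega | (simp; omega)), pvBsearch]
    norm_num [PySem.List.pyGetD, PySem.List.pyIdx?]
    rw [if_pos (by first | omega | (simp; omega)), pvBsearch]
    norm_num [PySem.List.pyGetD, PySem.List.pyIdx?]
    rw [if_pos (by first | omega | (simp; omega)), pvBsearch]
    simp [h1, h2, h3, h4]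
  by_cases h5 : num ≤ 15
  · rw [pvBsearch]; norm_num [PySem.List.pyGetD, PySem.List.pyIdx?]
    rw [if_pos (by first | omega | (simp; omega)), pvBsearch]
    norm_num [PySem.List.pyGetD, PySem.List.pyIdx?]
    rw [if_neg (by first | omega | (simp; omega)), pvBsearch]
    norm_num [PySem.List.pyGetD, PySem.List.pyIdx?]
    rw [if_neg (by first | omega | (simp; omega)), pvBsearch]
    simp [h1, h2, h3, h4, h5]
  by_cases h6 : num ≤ 21
  · rw [pvBsearch]; norm_num [PySem.List.pyGetD, PySem.List.pyIdx?]
    rw [if_pos (by first | omega | (simp; omega)), pvBsearch]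
    norm_num [PySem.List.pyGetD, PySem.List.pyIdx?]
    rw [if_neg (by first | omega | (simp; omega)), pvBsearch]
    norm_num [PySem.List.pyGetD, PySem.List.pyIdx?]
    rw [if_pos (by first | omega | (simp; omega)), pvBsearch]
    simp [h1, h2, h3, h4, h5, h6]
  by_cases h7 : num ≤ 28
  · rw [pvBsearch]; norm_num [PySem.List.pyGetD, PySem.List.pyIdx?]
    rw [if_pos (by first | omega | (simp; omega)), pvBsearch]
    norm_num [PySem.List.pyGetD, PySem.List.pyIdx?]
    rw [if_pos (by first | omega | (simp; omega)), pvBsearch]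
    norm_num [PySem.List.pyGetD, PySem.List.pyIdx?]
    rw [if_neg (by first | omega | (simp; omega)), pvBsearch]
    simp [h1, h2, h3, h4, h5, h6, h7]
  · rw [pvBsearch]; norm_num [PySem.List.pyGetD, PySem.List.pyIdx?]
    rw [if_pos (by first | omega | (simp; omega)), pvBsearch]
    norm_num [PySem.List.pyGetD, PySem.List.pyIdx?]
    rw [if_pos (by first | omega | (simp; omega)), pvBsearch]
    norm_num [PySem.List.pyGetD, PySem.List.pyIdx?]
    rw [if_pos (by first | omega | (simp; omega)), pvBsearch]
    simp [h1, h2, h3, h4, h5, h6, h7]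

theorem pvALoop_eval (num : Int) (h0 : ¬ num = 0) :
    (pvALoop num [1, 2, 3, 4, 5, 6, 7] (0, 0)).2 =
      if num ≤ 1 then 1 else if num ≤ 3 then 2 else if num ≤ 6 then 3
      else if num ≤ 10 then 4 else if num ≤ 15 then 5 else if num ≤ 21 then 6
      else 7 := by
  simp only [pvALoop, h0, if_false, eq_self_iff_true]
  norm_num
  split_ifs <;> simp_all <;> omega

-- ===== VERDICT (by name: the statement is the Claim_ definition above) =====
theorem first_code_spec : Claim_equal_first_code := by
  intro num _
  unfold Spec_first_code first_code first_code_alt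
  by_cases h0 : num = 0
  · simp [h0]
  · have hr : PySem.List.pyRange 1 8 1 = [1, 2, 3, 4, 5, 6, 7] := by decide
    rw [hr]
    simp only [h0, if_false]
    rw [pvBsearch_eval num]
    have hA := pvALoop_eval num h0
    by_cases h1 : num ≤ 1 <;> by_cases h2 : num ≤ 3 <;> by_cases h3 : num ≤ 6 <;>
      by_cases h4 : num ≤ 10 <;> by_cases h5 : num ≤ 15 <;> by_cases h6 : num ≤ 21 <;>
      by_cases h7 : num ≤ 28 <;>
      first
      | omega
      | (simp only [h1, h2, h3, h4, h5, h6, h7, if_true, if_false, eq_self_iff_true,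
            not_false_iff, if_neg, if_pos] at hA ⊢
         simp [hA, h0, h1, h2, h3, h4, h5, h6, h7, PySem.List.pyGetD, PySem.List.pyIdx?])
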